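-- pv_equiv track=rewrite | github.com/WSm-77/WDI | set4/18.py | maxSumInTable
-- ===== SOURCE A (Python) =====
-- def maxSumInTable(tab):
--     tabLen = len(tab)
--     maxSum = 0
--     for R in range(tabLen):
--         for C in range(tabLen):
--             #sum for row
--             subArrayLen = 0
--             currentSum = 0
--             while subArrayLen < 10 and C + subArrayLen < tabLen:
--                 currentSum += tab[R][C + subArrayLen]
--                 maxSum = max(maxSum, currentSum)
--                 subArrayLen += 1
--             #end while
--
--             #sum for collumn
--             subArrayLen = 0
--             currentSum = 0
--             while subArrayLen < 10 and R + subArrayLen < tabLen: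
--                 currentSum += tab[R + subArrayLen][C]
--                 maxSum = max(maxSum, currentSum)
--                 subArrayLen += 1
--             #end while
--         #end for
--     #end for
--     return maxSum
-- ===== SOURCE B (Python) =====
-- def maxSumInTable(tab):
--     n = len(tab)
--     rowPre = []
--     for row in tab:
--         p = [0]
--         for x in row[:n]:
--             p.append(p[-1] + x)
--         rowPre.append(p)
--     colPre = [[0] for _ in range(n)]
--     for row in tab:
--         for C in range(n):
--             colPre[C].append(colPre[C][-1] + row[C])
--     best = 0
--     for R in range(n):
--         for C in range(n):
--             for L in range(1, min(10, n - C) + 1):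
--                 best = max(best, rowPre[R][C + L] - rowPre[R][C])
--             for L in range(1, min(10, n - R) + 1):
--                 best = max(best, colPre[C][R + L] - colPre[C][R])
--     return best
-- ===== Notes on version B (the rewrite author's own statement) =====
-- stated objective: alternative
-- what changed: B precomputes row and column prefix-sum tables in separate passes and obtains each bounded window sum as a prefix difference over a bounded for-range, replacing A's running-accumulation while loops inside each cell.
import Mathlib
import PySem

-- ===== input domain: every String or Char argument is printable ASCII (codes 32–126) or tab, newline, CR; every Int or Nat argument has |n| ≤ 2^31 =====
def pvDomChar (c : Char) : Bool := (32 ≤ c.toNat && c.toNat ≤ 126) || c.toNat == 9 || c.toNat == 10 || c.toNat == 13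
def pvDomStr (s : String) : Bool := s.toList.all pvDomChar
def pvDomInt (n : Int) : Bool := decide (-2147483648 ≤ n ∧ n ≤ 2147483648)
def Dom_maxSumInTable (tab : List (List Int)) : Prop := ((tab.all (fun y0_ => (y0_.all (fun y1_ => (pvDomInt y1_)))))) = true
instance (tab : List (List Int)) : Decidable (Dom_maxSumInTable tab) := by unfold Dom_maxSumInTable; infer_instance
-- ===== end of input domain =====

-- B replaces A's per-cell running-sum while loops by precomputed row/column prefix-sum
-- tables, reading each bounded window sum as a prefix difference (alternative, same cost).

-- ===== PORT A =====
-- the 'while subArrayLen < 10 and off + subArrayLen < n' loop of A, with the indexed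
-- read abstracted as f; element access is total getD (Pre_ excludes the ragged inputs
-- where the Python raises IndexError)
def aWhile (f : Nat → Int) (n off sub : Nat) (cur best : Int) : Int :=
  if sub < 10 ∧ off + sub < n then
    aWhile f n off (sub + 1) (cur + f sub) (max best (cur + f sub))
  else best
termination_by 10 - sub
decreasing_by omega

def maxSumInTable (tab : List (List Int)) : Int :=
  let n := tab.length
  (List.range n).foldl (fun maxS R =>
    (List.range n).foldl (fun maxS C =>
      let m1 := aWhile (fun j => (tab.getD R []).getD (C + j) 0) n C 0 0 maxS
      aWhile (fun j => (tab.getD (R + j) []).getD C 0) n R 0 0 m1) maxS) 0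

-- ===== PORT B =====
-- p = [0]; for x in row[:n]: p.append(p[-1] + x)
def buildPre (xs : List Int) : List Int :=
  xs.foldl (fun p x => p ++ [p.getLastD 0 + x]) [(0 : Int)]

-- one row of the column-prefix pass: for C in range(n): colPre[C].append(colPre[C][-1] + row[C])
def colStep (n : Nat) (cp : List (List Int)) (row : List Int) : List (List Int) :=
  (List.range n).map (fun C => cp.getD C [] ++ [(cp.getD C []).getLastD 0 + row.getD C 0])

def maxSumInTable_alt (tab : List (List Int)) : Int :=
  let n := tab.length
  let rowPre := tab.map (fun row => buildPre (row.take n))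
  let colPre := tab.foldl (colStep n) ((List.range n).map (fun _ => [(0 : Int)]))
  (List.range n).foldl (fun best R =>
    (List.range n).foldl (fun best C =>
      let b1 := (List.range' 1 (min 10 (n - C))).foldl
        (fun b L => max b ((rowPre.getD R []).getD (C + L) 0 - (rowPre.getD R []).getD C 0)) best
      (List.range' 1 (min 10 (n - R))).foldl
        (fun b L => max b ((colPre.getD C []).getD (R + L) 0 - (colPre.getD C []).getD R 0)) b1) best) 0

-- ===== PRECONDITION & SPEC =====
-- Pre_ excludes exactly the ragged tables (a row shorter than len(tab)), on which the
-- Python A raises IndexError (and the Python B raises there too).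
def Pre_maxSumInTable (tab : List (List Int)) : Prop :=
  ∀ row ∈ tab, tab.length ≤ row.length
instance (tab : List (List Int)) : Decidable (Pre_maxSumInTable tab) := by
  unfold Pre_maxSumInTable; infer_instance
def pvWitness_maxSumInTable : List (List Int) := [[1, -2], [3, 4]]

def Spec_maxSumInTable (tab : List (List Int)) (out : Int) : Prop := out = maxSumInTable_alt tab
instance (tab : List (List Int)) (out : Int) : Decidable (Spec_maxSumInTable tab out) := by unfold Spec_maxSumInTable; infer_instance

-- ===== CLAIM (what is proved, stated in full; the proofs are below) =====
def Claim_equal_maxSumInTable : Prop := ∀ (tab : List (List Int)), Dom_maxSumInTable tab → Pre_maxSumInTable tab → Spec_maxSumInTable tab (maxSumInTable tab)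

-- ===== LEMMAS AND PROOFS =====

-- prefix sum of the first i elements (saturating past the end)
def psum (xs : List Int) (i : Nat) : Int := (xs.take i).sum

theorem psum_succ (xs : List Int) (i : Nat) :
    psum xs (i + 1) = psum xs i + xs.getD i 0 := by
  unfold psum
  rw [List.take_succ]
  cases h : xs[i]? <;>
    simp [List.getD_eq_getElem?_getD, h]

theorem psum_snoc_of_le (ys : List Int) (x : Int) (i : Nat) (h : i ≤ ys.length) :
    psum (ys ++ [x]) i = psum ys i := by
  unfold psum
  rw [List.take_append, Nat.sub_eq_zero_of_le h]
  simp

theorem psum_length (ys : List Int) : psum ys ys.length = ys.sum := by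
  simp [psum]

-- the generic while-loop of A as a fold of prefix differences
theorem aWhile_eq (f : Nat → Int) (F : Nat → Int) (hF : ∀ j, F (j + 1) = F j + f j)
    (n off : Nat) :
    ∀ k s cur best, 10 - s ≤ k →
      aWhile f n off s cur best =
        (List.range' (s + 1) (min 10 (n - off) - s)).foldl
          (fun b L => max b (cur + (F L - F s))) best := by
  intro k
  induction k with
  | zero =>
    intro s cur best hk
    rw [aWhile]
    have hs : 10 ≤ s := by omega
    have : min 10 (n - off) - s = 0 := by omega
    rw [this]
    simp [hs]
  | succ k ih =>
    intro s cur best hk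
    rw [aWhile]
    by_cases h : s < 10 ∧ off + s < n
    · have hlt : s < min 10 (n - off) := by omega
      have hsplit : min 10 (n - off) - s = (min 10 (n - off) - (s + 1)) + 1 := by omega
      rw [if_pos h, hsplit, List.range'_succ, List.foldl_cons]
      rw [ih (s + 1) (cur + f s) (max best (cur + f s)) (by omega)]
      have hfun : (fun (b : Int) (L : Nat) => max b (cur + f s + (F L - F (s + 1))))
          = (fun (b : Int) (L : Nat) => max b (cur + (F L - F s))) := by
        funext b L
        rw [hF s]; ring_nf
      rw [hfun]
      have : cur + f s = cur + (F (s + 1) - F s) := by rw [hF s]; ring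
      rw [this]
    · have : min 10 (n - off) - s = 0 := by omega
      rw [if_neg h, this]
      simp

-- buildPre computes the prefix-sum table
theorem preMap_snoc (ys : List Int) (x : Int) :
    (List.range (ys.length + 2)).map (fun i => psum (ys ++ [x]) i)
      = (List.range (ys.length + 1)).map (fun i => psum ys i) ++ [ys.sum + x] := by
  rw [show ys.length + 2 = (ys.length + 1) + 1 from rfl, List.range_succ, List.map_append]
  congr 1
  · exact List.map_congr_left (fun i hi => psum_snoc_of_le ys x i (by
      simp only [List.mem_range] at hi; omega))
  · simp only [List.map_cons, List.map_nil]
    congr 1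
    rw [show ys.length + 1 = (ys ++ [x]).length from by simp, psum_length]
    simp

theorem getLastD_map_range (g : Nat → Int) (m : Nat) :
    ((List.range (m + 1)).map g).getLastD 0 = g m := by
  rw [List.range_succ, List.map_append]
  simp

theorem buildPre_eq (xs : List Int) :
    buildPre xs = (List.range (xs.length + 1)).map (fun i => psum xs i) := by
  induction xs using List.reverseRecOn with
  | nil => simp [buildPre, psum]
  | append_singleton ys x ih =>
    unfold buildPre at *
    rw [List.foldl_append, ih, List.foldl_cons, List.foldl_nil]
    rw [show ys.length + 1 = ys.length + 1 from rfl, getLastD_map_range]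
    rw [show (ys ++ [x]).length + 1 = ys.length + 2 from by simp, preMap_snoc]
    rw [psum_length]

theorem getD_map_range' (g : Nat → List Int) (m i : Nat) (h : i < m) :
    ((List.range m).map g).getD i [] = g i := by
  simp [List.getD_eq_getElem?_getD, List.getElem?_map, List.getElem?_range, h]

theorem getD_map_range_int (g : Nat → Int) (m i : Nat) (h : i < m) :
    ((List.range m).map g).getD i 0 = g i := by
  simp [List.getD_eq_getElem?_getD, List.getElem?_map, List.getElem?_range, h]

-- the column of index C, as read by both ports (total, default 0)
def colv (tab : List (List Int)) (C : Nat) : List Int :=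
  tab.map (fun row => row.getD C 0)

theorem colFold_eq (n : Nat) (rs : List (List Int)) :
    rs.foldl (colStep n) ((List.range n).map (fun _ => [(0 : Int)]))
      = (List.range n).map (fun C => (List.range (rs.length + 1)).map (fun i => psum (colv rs C) i)) := by
  induction rs using List.reverseRecOn with
  | nil => simp [colv, psum]
  | append_singleton rs r ih =>
    rw [List.foldl_append, ih, List.foldl_cons, List.foldl_nil]
    unfold colStep
    apply List.map_congr_left
    intro C hC
    simp only [List.mem_range] at hC
    rw [getD_map_range' _ _ _ hC]
    have hcolv : colv (rs ++ [r]) C = colv rs C ++ [r.getD C 0] := by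
      simp [colv]
    rw [show (rs ++ [r]).length + 1 = rs.length + 2 from by simp, hcolv]
    have hlen : rs.length = (colv rs C).length := by simp [colv]
    rw [hlen, preMap_snoc, getLastD_map_range, psum_length]

theorem psum_take (xs : List Int) (n i : Nat) (h : i ≤ n) :
    psum (xs.take n) i = psum xs i := by
  simp [psum, List.take_take, Nat.min_eq_left h]

theorem getD_getD_eq_colv (tab : List (List Int)) (C j : Nat) :
    (tab.getD j []).getD C 0 = (colv tab C).getD j 0 := by
  by_cases h : j < tab.length
  · simp [colv, List.getD_eq_getElem?_getD, List.getElem?_map,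
      List.getElem?_eq_getElem h]
  · have t1 : tab[j]? = none := List.getElem?_eq_none (by omega)
    have t2 : (colv tab C)[j]? = none := by
      apply List.getElem?_eq_none
      simp only [colv, List.length_map]
      omega
    simp [List.getD_eq_getElem?_getD, t1, t2]

-- A's row while-loop equals B's row prefix-difference fold
theorem cell_row_eq (tab : List (List Int)) (R C : Nat) (best : Int)
    (hR : R < tab.length) (hC : C < tab.length)
    (hrl : tab.length ≤ (tab.getD R []).length) :
    aWhile (fun j => (tab.getD R []).getD (C + j) 0) tab.length C 0 0 best
      = (List.range' 1 (min 10 (tab.length - C))).foldl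
          (fun b L => max b (((tab.map (fun row => buildPre (row.take tab.length))).getD R []).getD (C + L) 0
            - ((tab.map (fun row => buildPre (row.take tab.length))).getD R []).getD C 0)) best := by
  set n := tab.length with hn
  set row := tab.getD R [] with hrow
  rw [aWhile_eq (fun j => row.getD (C + j) 0) (fun L => psum row (C + L))
      (fun j => by
        show psum row (C + (j + 1)) = psum row (C + j) + row.getD (C + j) 0
        rw [show C + (j + 1) = (C + j) + 1 from rfl, psum_succ]) n C 10 0 0 best (by omega)]
  have hget : (tab.map (fun row => buildPre (row.take n))).getD R [] = buildPre (row.take n) := by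
    simp [List.getD_eq_getElem?_getD, List.getElem?_map, List.getElem?_eq_getElem hR, hrow,
      List.getD_eq_getElem?_getD]
  rw [hget, buildPre_eq]
  apply PySem.List.foldl_congr_mem
  intro b L hL
  rw [List.mem_range'_1] at hL
  have hLe : C + L ≤ n := by omega
  have hread : ∀ i, i ≤ n → ((List.range ((row.take n).length + 1)).map (fun i => psum (row.take n) i)).getD i 0 = psum row i := by
    intro i hi
    rw [getD_map_range_int _ _ _ (by rw [List.length_take]; omega), psum_take _ _ _ hi]
  rw [hread (C + L) hLe, hread C (by omega)]
  ring_nf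

-- A's column while-loop equals B's column prefix-difference fold
theorem cell_col_eq (tab : List (List Int)) (R C : Nat) (best : Int)
    (hR : R < tab.length) (hC : C < tab.length) :
    aWhile (fun j => (tab.getD (R + j) []).getD C 0) tab.length R 0 0 best
      = (List.range' 1 (min 10 (tab.length - R))).foldl
          (fun b L => max b (((tab.foldl (colStep tab.length) ((List.range tab.length).map (fun _ => [(0 : Int)]))).getD C []).getD (R + L) 0
            - ((tab.foldl (colStep tab.length) ((List.range tab.length).map (fun _ => [(0 : Int)]))).getD C []).getD R 0)) best := by
  set n := tab.length with hn
  have hfun : (fun j => (tab.getD (R + j) []).getD C 0) = (fun j => (colv tab C).getD (R + j) 0) := by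
    funext j; exact getD_getD_eq_colv tab C (R + j)
  rw [hfun]
  rw [aWhile_eq (fun j => (colv tab C).getD (R + j) 0) (fun L => psum (colv tab C) (R + L))
      (fun j => by
        show psum (colv tab C) (R + (j + 1)) = psum (colv tab C) (R + j) + (colv tab C).getD (R + j) 0
        rw [show R + (j + 1) = (R + j) + 1 from rfl, psum_succ]) n R 10 0 0 best (by omega)]
  rw [colFold_eq, getD_map_range' _ _ _ hC]
  apply PySem.List.foldl_congr_mem
  intro b L hL
  rw [List.mem_range'_1] at hL
  have h1 : R + L < n + 1 := by omega
  rw [getD_map_range_int _ _ _ h1, getD_map_range_int _ _ _ (by omega)]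
  ring_nf

-- ===== VERDICT (by name: the statement is the Claim_ definition above) =====
theorem maxSumInTable_spec : Claim_equal_maxSumInTable := by
  intro tab _ hpre
  unfold Spec_maxSumInTable maxSumInTable maxSumInTable_alt
  apply PySem.List.foldl_congr_mem
  intro accR R hRmem
  apply PySem.List.foldl_congr_mem
  intro accC C hCmem
  rw [List.mem_range] at hRmem hCmem
  have hmem : tab.getD R [] ∈ tab := by
    rw [List.getD_eq_getElem?_getD, List.getElem?_eq_getElem hRmem]
    exact List.getElem_mem hRmem
  rw [cell_row_eq tab R C accC hRmem hCmem (hpre _ hmem), cell_col_eq tab R C _ hRmem hCmem]
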